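-- pv_equiv track=rewrite | github.com/LyubomiraVelinova/Kreativstorm-Training-Program | 01/error_handling.py | get_largest_integer
-- ===== SOURCE A (Python) =====
-- def get_largest_integer(numbers: list):
--     largest_int = None
--
--     for char in numbers:
--         try:
--             if largest_int is None or int(char) > largest_int:
--                 largest_int = int(char)
--         except ValueError:
--             pass
--     return largest_int
-- ===== SOURCE B (Python) =====
-- def get_largest_integer(numbers: list):
--     ints = []
--     for char in numbers:
--         try:
--             ints.append(int(char))
--         except ValueError:
--             pass
--     return max(ints) if ints else None
-- ===== Notes on version B (the rewrite author's own statement) =====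
-- stated objective: simpler
-- what changed: Replaces A's running-maximum accumulator with None-sentinel branching by a collect-then-reduce decomposition: gather all parseable integers, then take max(ints) if non-empty else None.
import Mathlib
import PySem

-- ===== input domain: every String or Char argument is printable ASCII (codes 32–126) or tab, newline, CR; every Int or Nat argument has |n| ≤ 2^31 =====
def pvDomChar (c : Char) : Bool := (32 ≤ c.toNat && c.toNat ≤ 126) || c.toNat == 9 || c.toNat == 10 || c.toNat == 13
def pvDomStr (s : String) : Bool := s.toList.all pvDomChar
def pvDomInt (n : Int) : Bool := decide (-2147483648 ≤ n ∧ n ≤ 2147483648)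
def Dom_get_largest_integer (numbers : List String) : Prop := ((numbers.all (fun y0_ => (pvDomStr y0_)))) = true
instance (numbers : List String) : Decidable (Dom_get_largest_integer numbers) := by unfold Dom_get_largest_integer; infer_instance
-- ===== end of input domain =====

-- B replaces A's running-maximum accumulator by collect-then-reduce (simpler decomposition).


-- ===== PORT A =====
-- running maximum; int(char) failing with ValueError is 'pass' (ofStr? = none)
def get_largest_integer (numbers : List String) : Option Int :=
  numbers.foldl (fun largest_int char =>
    match PySem.Int.ofStr? char with
    | none => largest_int
    | some v =>
      match largest_int with
      | none => some v
      | some l => if v > l then some v else largest_int) none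

-- ===== PORT B =====
-- collect all parseable integers, then max(ints) if ints else None
def get_largest_integer_alt (numbers : List String) : Option Int :=
  let ints := numbers.foldl (fun acc char =>
    match PySem.Int.ofStr? char with
    | none => acc
    | some v => acc ++ [v]) []
  PySem.List.max? ints (fun y => y)

-- ===== PRECONDITION & SPEC =====
def Spec_get_largest_integer (numbers : List String) (out : Option Int) : Prop := out = get_largest_integer_alt numbers
instance (numbers : List String) (out : Option Int) : Decidable (Spec_get_largest_integer numbers out) := by unfold Spec_get_largest_integer; infer_instance

-- ===== CLAIM (what is proved, stated in full; the proofs are below) =====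
def Claim_equal_get_largest_integer : Prop := ∀ (numbers : List String), Dom_get_largest_integer numbers → Spec_get_largest_integer numbers (get_largest_integer numbers)

-- ===== LEMMAS AND PROOFS =====

-- A's loop started from a known maximum m computes the running max over the parseable values.
theorem foldA_some (xs : List String) (m : Int) :
    xs.foldl (fun largest_int char =>
      match PySem.Int.ofStr? char with
      | none => largest_int
      | some v =>
        match largest_int with
        | none => some v
        | some l => if v > l then some v else largest_int) (some m)
    = some ((xs.filterMap PySem.Int.ofStr?).foldl max m) := by
  induction xs generalizing m with
  | nil => simp
  | cons s t ih =>
    simp only [List.foldl_cons, List.filterMap_cons]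
    cases h : PySem.Int.ofStr? s with
    | none => simp [ih]
    | some v =>
      have hm : (if v > m then (some v : Option Int) else some m) = some (max m v) := by
        split_ifs with hv
        · simp [max_eq_right (le_of_lt hv)]
        · simp [max_eq_left (by omega : v ≤ m)]
      simp only [hm, ih, List.foldl_cons]

-- A's loop from None: none if nothing parses, else running max from the first parsed value.
theorem foldA_none (xs : List String) :
    xs.foldl (fun largest_int char =>
      match PySem.Int.ofStr? char with
      | none => largest_int
      | some v =>
        match largest_int with
        | none => some v
        | some l => if v > l then some v else largest_int) none
    = (match xs.filterMap PySem.Int.ofStr? with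
       | [] => none
       | x :: t => some (t.foldl max x)) := by
  induction xs with
  | nil => simp
  | cons s t ih =>
    simp only [List.foldl_cons, List.filterMap_cons]
    cases h : PySem.Int.ofStr? s with
    | none => simpa using ih
    | some v => simpa using foldA_some t v

-- B's collecting loop is filterMap.
theorem foldB_collect (xs : List String) (acc : List Int) :
    xs.foldl (fun acc char =>
      match PySem.Int.ofStr? char with
      | none => acc
      | some v => acc ++ [v]) acc
    = acc ++ xs.filterMap PySem.Int.ofStr? := by
  induction xs generalizing acc with
  | nil => simp
  | cons s t ih =>
    simp only [List.foldl_cons, List.filterMap_cons]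
    cases h : PySem.Int.ofStr? s with
    | none => simp [ih]
    | some v => simp [ih]

-- ===== VERDICT (by name: the statement is the Claim_ definition above) =====
theorem get_largest_integer_spec : Claim_equal_get_largest_integer := by
  intro numbers _
  unfold Spec_get_largest_integer get_largest_integer get_largest_integer_alt
  rw [foldA_none, foldB_collect]
  cases h : numbers.filterMap PySem.Int.ofStr? with
  | nil => simpa using ((PySem.List.max?_eq_none_iff ([]:List Int) (fun y => y)).mpr rfl).symm
  | cons x t => simp [PySem.List.max?_id_cons]
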